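-- pv_equiv track=rewrite | github.com/khav-i/Work-with-OMG-sensors-data | useful_features.py | count_adjacent_classes
-- ===== SOURCE A (Python) =====
-- def count_adjacent_classes(vector):
--     adj_classes = {}
--     current_class = vector[0]
--     count = 1
--     class_count = {}
--
--     for i in range(1, len(vector)):
--         if vector[i] == current_class:
--             count += 1
--         else:
--             key = f"{current_class}({class_count.get(current_class, 0)})"
--             if count > 1:
--                 key = f"{current_class}({class_count.get(current_class, 0)})"
--             adj_classes[key] = count
--             class_count[current_class] = class_count.get(current_class, 0) + 1
--             current_class = vector[i]
--             count = 1
--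
--     key = f"{current_class}({class_count.get(current_class, 0)})"
--     if count > 1:
--         key = f"{current_class}({class_count.get(current_class, 0)})"
--     adj_classes[key] = count
--     class_count[current_class] = class_count.get(current_class, 0) + 1
--
--     return adj_classes
-- ===== SOURCE B (Python) =====
-- def count_adjacent_classes(vector):
--     # Phase 1: collapse the vector into consecutive runs [value, length].
--     runs = []
--     for x in vector:
--         if runs and runs[-1][0] == x:
--             runs[-1][1] += 1
--         else:
--             runs.append([x, 1])
--     # Phase 2: label the runs in order with a per-class occurrence counter.
--     adj_classes = {}
--     class_count = {}
--     for value, length in runs: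
--         occ = class_count.get(value, 0)
--         adj_classes[f"{value}({occ})"] = length
--         class_count[value] = occ + 1
--     return adj_classes
-- ===== Notes on version B (the rewrite author's own statement) =====
-- stated objective: simpler
-- what changed: Replaces A's single index-driven state machine (current_class/count/two dicts updated in one pass, with a dead count>1 branch recomputing the same key) by two plain phases: first collapse the vector into a list of (value, length) runs, then label the runs with a per-class occurrence counter.
import Mathlib
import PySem

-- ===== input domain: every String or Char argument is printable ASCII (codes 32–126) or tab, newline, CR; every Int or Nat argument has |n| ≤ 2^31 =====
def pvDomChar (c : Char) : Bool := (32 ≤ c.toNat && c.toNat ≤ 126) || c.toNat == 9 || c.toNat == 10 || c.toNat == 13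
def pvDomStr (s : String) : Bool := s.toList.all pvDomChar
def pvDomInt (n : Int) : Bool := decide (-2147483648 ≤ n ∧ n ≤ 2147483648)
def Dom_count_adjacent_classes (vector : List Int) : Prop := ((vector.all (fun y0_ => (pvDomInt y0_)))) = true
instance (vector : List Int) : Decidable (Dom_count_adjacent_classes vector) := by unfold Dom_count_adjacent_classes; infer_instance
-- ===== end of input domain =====

-- B replaces A's one-pass state machine by two phases (collect runs, then label them);
-- the equivalence is about the return value on non-empty input (on the empty list A raises IndexError at its first-element access).

-- ===== PORT A =====
-- A's loop body: state (adj_classes, current_class, count, class_count), fed vector[i].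
def pvAStep (st : PySem.Dict String Int × Int × Int × PySem.Dict Int Int) (x : Int) :
    PySem.Dict String Int × Int × Int × PySem.Dict Int Int :=
  let (adj, cur, count, cc) := st
  if x = cur then (adj, cur, count + 1, cc)
  else
    let key := PySem.Int.toStr cur ++ "(" ++ PySem.Int.toStr (cc.getD cur 0) ++ ")"
    let key := if count > 1 then
        PySem.Int.toStr cur ++ "(" ++ PySem.Int.toStr (cc.getD cur 0) ++ ")" else key
    (adj.insert key count, x, 1, cc.insert cur (cc.getD cur 0 + 1))

def count_adjacent_classes (vector : List Int) : List (String × Int) :=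
  match (PySem.List.pyRange 1 (PySem.List.len vector) 1).foldl
      (fun st i => pvAStep st (PySem.List.pyGetD vector i 0))
      (PySem.Dict.empty, PySem.List.pyGetD vector 0 0, 1, PySem.Dict.empty) with
  | (adj, cur, count, cc) =>
    -- final block: key is recomputed identically in the dead count > 1 branch
    (adj.insert
      (if count > 1 then PySem.Int.toStr cur ++ "(" ++ PySem.Int.toStr (cc.getD cur 0) ++ ")"
       else PySem.Int.toStr cur ++ "(" ++ PySem.Int.toStr (cc.getD cur 0) ++ ")") count).items

-- ===== PORT B =====
-- B phase 1 loop body: extend the last run or start a new one.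
def pvRunStep (runs : List (Int × Int)) (x : Int) : List (Int × Int) :=
  match runs.getLast? with
  | some (v, c) => if v = x then runs.dropLast ++ [(v, c + 1)] else runs ++ [(x, 1)]
  | none => [(x, 1)]

-- B phase 2 loop body: (adj_classes, class_count) updated per run.
def pvLabelStep (p : PySem.Dict String Int × PySem.Dict Int Int) (r : Int × Int) :
    PySem.Dict String Int × PySem.Dict Int Int :=
  let occ := p.2.getD r.1 0
  (p.1.insert (PySem.Int.toStr r.1 ++ "(" ++ PySem.Int.toStr occ ++ ")") r.2,
   p.2.insert r.1 (occ + 1))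

def count_adjacent_classes_alt (vector : List Int) : List (String × Int) :=
  ((vector.foldl pvRunStep []).foldl pvLabelStep (PySem.Dict.empty, PySem.Dict.empty)).1.items

-- ===== PRECONDITION & SPEC =====
-- Pre_ excludes only the empty list, on which A raises IndexError at its first-element access.
def Pre_count_adjacent_classes (vector : List Int) : Prop := vector ≠ []
instance (vector : List Int) : Decidable (Pre_count_adjacent_classes vector) := by
  unfold Pre_count_adjacent_classes; infer_instance

def pvWitness_count_adjacent_classes : List Int := [1, 1, 2, 1]

def Spec_count_adjacent_classes (vector : List Int) (out : List (String × Int)) : Prop :=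
  out = count_adjacent_classes_alt vector
instance (vector : List Int) (out : List (String × Int)) :
    Decidable (Spec_count_adjacent_classes vector out) := by
  unfold Spec_count_adjacent_classes; infer_instance

-- ===== CLAIM (what is proved, stated in full; the proofs are below) =====
def Claim_equal_count_adjacent_classes : Prop := ∀ (vector : List Int),
  Dom_count_adjacent_classes vector → Pre_count_adjacent_classes vector →
  Spec_count_adjacent_classes vector (count_adjacent_classes vector)

-- ===== LEMMAS AND PROOFS =====

-- B's phase-2 fold, as a function of the run list (proof-side abbreviation).
def pvLab (rs : List (Int × Int)) : PySem.Dict String Int × PySem.Dict Int Int :=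
  rs.foldl pvLabelStep (PySem.Dict.empty, PySem.Dict.empty)

-- A's post-loop finalisation (the dead count>1 branch collapsed: both arms are the same key).
def pvFin (st : PySem.Dict String Int × Int × Int × PySem.Dict Int Int) : PySem.Dict String Int :=
  st.1.insert (PySem.Int.toStr st.2.1 ++ "(" ++ PySem.Int.toStr (st.2.2.2.getD st.2.1 0) ++ ")")
    st.2.2.1

lemma pvLab_append_singleton (rs : List (Int × Int)) (p : Int × Int) :
    pvLab (rs ++ [p]) = pvLabelStep (pvLab rs) p := by
  simp [pvLab, List.foldl_append]

-- Invariant: A's loop over the tail, started from the labelling of the completed runs rs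
-- plus the open run (v, c), finishes to the labelling of all runs produced by B's phase 1.
lemma pvMain (t : List Int) : ∀ (rs : List (Int × Int)) (v c : Int),
    pvFin (t.foldl pvAStep ((pvLab rs).1, v, c, (pvLab rs).2))
      = (pvLab (t.foldl pvRunStep (rs ++ [(v, c)]))).1 := by
  induction t with
  | nil =>
    intro rs v c
    simp [pvFin, pvLab_append_singleton, pvLabelStep]
  | cons x t ih =>
    intro rs v c
    by_cases hx : x = v
    · subst hx
      have hA : pvAStep ((pvLab rs).1, x, c, (pvLab rs).2) x
          = ((pvLab rs).1, x, c + 1, (pvLab rs).2) := by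
        simp [pvAStep]
      have hB : pvRunStep (rs ++ [(x, c)]) x = rs ++ [(x, c + 1)] := by
        simp [pvRunStep]
      simp only [List.foldl_cons, hA, hB]
      exact ih rs x (c + 1)
    · have hA : pvAStep ((pvLab rs).1, v, c, (pvLab rs).2) x
          = ((pvLab (rs ++ [(v, c)])).1, x, 1, (pvLab (rs ++ [(v, c)])).2) := by
        rw [pvLab_append_singleton]
        simp [pvAStep, pvLabelStep, hx]
      have hB : pvRunStep (rs ++ [(v, c)]) x = (rs ++ [(v, c)]) ++ [(x, 1)] := by
        have hvx : v ≠ x := fun h => hx h.symm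
        simp [pvRunStep, hvx]
      simp only [List.foldl_cons, hA, hB]
      exact ih (rs ++ [(v, c)]) x 1

-- ===== VERDICT (by name: the statement is the Claim_ definition above) =====
theorem count_adjacent_classes_spec : Claim_equal_count_adjacent_classes := by
  intro vector _ hpre
  unfold Spec_count_adjacent_classes
  cases vector with
  | nil => exact absurd rfl hpre
  | cons h t =>
    show count_adjacent_classes (h :: t) = count_adjacent_classes_alt (h :: t)
    unfold count_adjacent_classes count_adjacent_classes_alt
    rw [show PySem.List.len (h :: t) = ((h :: t).length : Int) from PySem.List.len_eq _,
        PySem.List.foldl_pyRange_pyGetD' (h :: t) 0 pvAStep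
          (PySem.Dict.empty, PySem.List.pyGetD (h :: t) 0 0, 1, PySem.Dict.empty)
          (by omega : (0 : Int) ≤ 1),
        PySem.List.pyGetD_zero_cons h t 0]
    have hrs : (h :: t).foldl pvRunStep [] = t.foldl pvRunStep [(h, 1)] := by
      simp [pvRunStep]
    have hmain := pvMain t [] h 1
    simp only [pvLab, List.foldl_nil, List.nil_append] at hmain
    simp only [Int.toNat_one, List.drop_succ_cons, List.drop_zero, hrs, ite_self]
    simp only [pvFin] at hmain
    rw [hmain]
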